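-- pv_equiv track=rewrite | github.com/alancast/LeetCodeProblems | python/medium/2615_sum_of_distances.py | distance_brute_force
-- ===== SOURCE A (Python) =====
-- from collections import defaultdict
--
-- def distance_brute_force(nums: list[int]) -> list[int]:
--     # Create index map
--     index_map = defaultdict(list[int])
--     for i, num in enumerate(nums):
--         index_map[num].append(i)
--
--     # Find answer sums
--     answer = []
--     for i, num in enumerate(nums):
--         total = 0
--         for index in index_map[num]:
--             total += abs(i - index)
--
--         answer.append(total)
--
--     return answer
-- ===== SOURCE B (Python) =====
-- def distance_brute_force(nums: list[int]) -> list[int]: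
--     # Per-value (count, index-sum) totals + a left-to-right running prefix: O(n).
--     totals = {}
--     for i, num in enumerate(nums):
--         c, s = totals.get(num, (0, 0))
--         totals[num] = (c + 1, s + i)
--
--     seen = {}
--     answer = []
--     for i, num in enumerate(nums):
--         ct, st = totals[num]
--         cl, sl = seen.get(num, (0, 0))
--         answer.append(cl * i - sl + (st - sl - i) - (ct - cl - 1) * i)
--         seen[num] = (cl + 1, sl + i)
--     return answer
-- ===== Notes on version B (the rewrite author's own statement) =====
-- stated objective: faster
-- what changed: Replaces the per-element scan over all equal-valued indices with one pass collecting per-value (count, index-sum) totals and a second pass keeping a running prefix (count, sum) per value, so each answer is an O(1) arithmetic formula.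
import Mathlib
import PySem

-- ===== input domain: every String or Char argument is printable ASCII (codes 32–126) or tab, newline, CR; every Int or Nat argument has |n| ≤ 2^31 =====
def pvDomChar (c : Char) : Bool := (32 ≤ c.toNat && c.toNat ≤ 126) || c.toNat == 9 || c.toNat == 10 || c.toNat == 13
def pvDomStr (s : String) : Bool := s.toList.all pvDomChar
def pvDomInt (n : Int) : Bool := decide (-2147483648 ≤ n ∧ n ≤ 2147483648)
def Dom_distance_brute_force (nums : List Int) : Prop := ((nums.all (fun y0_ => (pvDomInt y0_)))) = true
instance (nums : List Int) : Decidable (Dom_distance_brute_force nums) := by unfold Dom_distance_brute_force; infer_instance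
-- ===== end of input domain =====

-- B replaces A's quadratic per-element scan over equal-valued index groups by one totals pass plus a
-- running prefix pass, O(1) arithmetic per element (objective: faster).

-- ===== PORT A =====
def distance_brute_force (nums : List Int) : List Int :=
  -- index_map: value -> list of its indices, built by appending
  let index_map := (PySem.List.enumerate nums 0).foldl
      (fun d p => d.modify p.2 [] (· ++ [p.1])) (PySem.Dict.empty : PySem.Dict Int (List Int))
  -- answer: for each (i, num), sum abs(i - index) over index_map[num]
  (PySem.List.enumerate nums 0).foldl
      (fun answer p =>
        answer ++ [(index_map.getD p.2 []).foldl (fun total j => total + |p.1 - j|) 0]) []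

-- ===== PORT B =====
def distance_brute_force_alt (nums : List Int) : List Int :=
  -- totals: value -> (count, index-sum) over the whole list
  let totals := (PySem.List.enumerate nums 0).foldl
      (fun d p => let cs := d.getD p.2 (0, 0); d.insert p.2 (cs.1 + 1, cs.2 + p.1))
      (PySem.Dict.empty : PySem.Dict Int (Int × Int))
  -- second pass: seen = running (count, index-sum) of the strict prefix; key lookup totals[num]
  -- is ported as getD (0,0) — the key is always present (Python's totals[num] never raises here)
  ((PySem.List.enumerate nums 0).foldl
      (fun st p =>
        let cts := totals.getD p.2 (0, 0)
        let cls := st.1.getD p.2 (0, 0)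
        (st.1.insert p.2 (cls.1 + 1, cls.2 + p.1),
         st.2 ++ [cls.1 * p.1 - cls.2 + (cts.2 - cls.2 - p.1) - (cts.1 - cls.1 - 1) * p.1]))
      ((PySem.Dict.empty : PySem.Dict Int (Int × Int)), ([] : List Int))).2

-- ===== PRECONDITION & SPEC =====
def Spec_distance_brute_force (nums : List Int) (out : List Int) : Prop := out = distance_brute_force_alt nums
instance (nums : List Int) (out : List Int) : Decidable (Spec_distance_brute_force nums out) := by unfold Spec_distance_brute_force; infer_instance

-- ===== CLAIM (what is proved, stated in full; the proofs are below) =====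
def Claim_equal_distance_brute_force : Prop := ∀ (nums : List Int), Dom_distance_brute_force nums → Spec_distance_brute_force nums (distance_brute_force nums)

-- ===== LEMMAS AND PROOFS =====

-- the common functional description: entry (i, v) ↦ Σ |i - j| over all positions j of value v
def pvGroup (E : List (Int × Int)) (v : Int) : List (Int × Int) :=
  E.filter (fun q => q.2 == v)

def pvSpecList (nums : List Int) : List Int :=
  (PySem.List.enumerate nums 0).map
    (fun p => ((pvGroup (PySem.List.enumerate nums 0) p.2).map (fun q => |p.1 - q.1|)).sum)

theorem pvGroup_append (E1 E2 : List (Int × Int)) (v : Int) :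
    pvGroup (E1 ++ E2) v = pvGroup E1 v ++ pvGroup E2 v := by
  simp [pvGroup]

theorem pvGroup_cons (i w v : Int) (t : List (Int × Int)) :
    pvGroup ((i, w) :: t) v = if w = v then (i, w) :: pvGroup t v else pvGroup t v := by
  simp [pvGroup, List.filter_cons]

-- A's index_map lookup is exactly the first components of the group
theorem pvIndexMap_getD (E : List (Int × Int)) (v : Int) :
    ((E.foldl (fun d p => d.modify p.2 [] (· ++ [p.1]))
        (PySem.Dict.empty : PySem.Dict Int (List Int))).getD v [])
      = (pvGroup E v).map (·.1) := by
  have h : E.foldl (fun d p => d.modify p.2 [] (· ++ [p.1]))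
        (PySem.Dict.empty : PySem.Dict Int (List Int))
      = (E.map (fun p => (p.2, p.1))).foldl (fun d q => d.modify q.1 [] (· ++ [q.2]))
        (PySem.Dict.empty : PySem.Dict Int (List Int)) := by
    rw [List.foldl_map]
  rw [h, PySem.Dict.getD_foldl_modify_append]
  simp [pvGroup, List.filter_map, Function.comp_def]

theorem pvA_eq_spec (nums : List Int) : distance_brute_force nums = pvSpecList nums := by
  unfold distance_brute_force pvSpecList
  rw [PySem.List.foldl_append_singleton_eq_map]
  simp only [List.nil_append]
  apply List.map_congr_left
  intro p _
  rw [pvIndexMap_getD]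
  rw [PySem.List.foldl_add _ (fun j => |p.1 - j|) 0]
  simp [Function.comp_def]

-- B's totals pass computes each value's (count, index-sum)
theorem pvTotals (l : List (Int × Int)) (d : PySem.Dict Int (Int × Int)) (v : Int) :
    ((l.foldl (fun d p =>
        let cs := d.getD p.2 (0, 0); d.insert p.2 (cs.1 + 1, cs.2 + p.1)) d).getD v (0, 0))
      = ((d.getD v (0, 0)).1 + (pvGroup l v).length,
         (d.getD v (0, 0)).2 + ((pvGroup l v).map (·.1)).sum) := by
  induction l generalizing d with
  | nil => simp [pvGroup]
  | cons p t ih =>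
    obtain ⟨i, w⟩ := p
    simp only [List.foldl_cons]
    rw [ih]
    rw [pvGroup_cons, PySem.Dict.getD_insert]
    by_cases hv : v = w
    · subst hv
      simp only [if_true, List.length_cons, List.map_cons, List.sum_cons, Prod.mk.injEq]
      constructor <;> (push_cast; ring)
    · rw [if_neg hv, if_neg (fun h => hv h.symm)]

-- Σ |i - q.1| in closed form on a side of i
theorem pvSumAbsLe (L : List (Int × Int)) (i : Int) (h : ∀ q ∈ L, q.1 ≤ i) :
    (L.map (fun q => |i - q.1|)).sum = i * L.length - (L.map (·.1)).sum := by
  induction L with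
  | nil => simp
  | cons q t ih =>
    have hq : |i - q.1| = i - q.1 := abs_of_nonneg (by
      have := h q (List.mem_cons_self ..); omega)
    simp only [List.map_cons, List.sum_cons, List.length_cons, hq,
      ih (fun x hx => h x (List.mem_cons_of_mem _ hx))]
    push_cast; ring

theorem pvSumAbsGe (L : List (Int × Int)) (i : Int) (h : ∀ q ∈ L, i ≤ q.1) :
    (L.map (fun q => |i - q.1|)).sum = (L.map (·.1)).sum - i * L.length := by
  induction L with
  | nil => simp
  | cons q t ih =>
    have hq : |i - q.1| = q.1 - i := by
      have := h q (List.mem_cons_self ..)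
      rw [abs_of_nonpos (by omega)]; ring
    simp only [List.map_cons, List.sum_cons, List.length_cons, hq,
      ih (fun x hx => h x (List.mem_cons_of_mem _ hx))]
    push_cast; ring

-- the second pass of B, with the prefix-stats invariant on `seen`
theorem pvLoopB (E : List (Int × Int)) (tot : Int → Int × Int)
    (htot : ∀ v, tot v = (((pvGroup E v).length : Int), ((pvGroup E v).map (·.1)).sum))
    (hsort : E.Pairwise (fun p q => p.1 < q.1)) :
    ∀ (l pre : List (Int × Int)), E = pre ++ l →
    ∀ (seen : PySem.Dict Int (Int × Int)),
      (∀ v, seen.getD v (0, 0)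
          = (((pvGroup pre v).length : Int), ((pvGroup pre v).map (·.1)).sum)) →
    ∀ (acc : List Int),
      (l.foldl (fun st p =>
          let cts := tot p.2
          let cls := st.1.getD p.2 (0, 0)
          (st.1.insert p.2 (cls.1 + 1, cls.2 + p.1),
           st.2 ++ [cls.1 * p.1 - cls.2 + (cts.2 - cls.2 - p.1)
                      - (cts.1 - cls.1 - 1) * p.1])) (seen, acc)).2
        = acc ++ l.map (fun p => ((pvGroup E p.2).map (fun q => |p.1 - q.1|)).sum) := by
  intro l
  induction l with
  | nil => intro pre _ seen _ acc; simp
  | cons p t ih =>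
    intro pre hE seen hseen acc
    obtain ⟨i, v⟩ := p
    -- order facts around position i
    have hpair := hE ▸ hsort
    rw [List.pairwise_append] at hpair
    obtain ⟨_, hct, hcross⟩ := hpair
    rw [List.pairwise_cons] at hct
    have hpre_lt : ∀ q ∈ pre, q.1 < i := fun q hq => hcross q hq (i, v) (List.mem_cons_self ..)
    have ht_gt : ∀ q ∈ t, i < q.1 := fun q hq => hct.1 q hq
    -- the emitted value is the spec value
    have hval : (seen.getD v (0, 0)).1 * i - (seen.getD v (0, 0)).2
          + ((tot v).2 - (seen.getD v (0, 0)).2 - i)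
          - ((tot v).1 - (seen.getD v (0, 0)).1 - 1) * i
        = ((pvGroup E v).map (fun q => |i - q.1|)).sum := by
      have hEg : pvGroup E v = pvGroup pre v ++ (i, v) :: pvGroup t v := by
        rw [hE, pvGroup_append, pvGroup_cons]; simp
      have hL : ∀ q ∈ pvGroup pre v, q.1 ≤ i := by
        intro q hq; exact le_of_lt (hpre_lt q (List.mem_of_mem_filter hq))
      have hR : ∀ q ∈ pvGroup t v, i ≤ q.1 := by
        intro q hq; exact le_of_lt (ht_gt q (List.mem_of_mem_filter hq))
      rw [hEg]
      rw [htot v, hseen v, hEg]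
      simp only [List.map_append, List.sum_append, List.map_cons, List.sum_cons,
        List.length_append, List.length_cons]
      rw [pvSumAbsLe _ _ hL, pvSumAbsGe _ _ hR]
      push_cast; ring_nf; simp
    -- the updated seen satisfies the invariant for pre ++ [(i, v)]
    have hinv : ∀ w, ((seen.insert v ((seen.getD v (0, 0)).1 + 1, (seen.getD v (0, 0)).2 + i)).getD w (0, 0))
        = (((pvGroup (pre ++ [(i, v)]) w).length : Int),
           ((pvGroup (pre ++ [(i, v)]) w).map (·.1)).sum) := by
      intro w
      rw [PySem.Dict.getD_insert, pvGroup_append, pvGroup_cons]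
      by_cases hw : w = v
      · subst hw
        rw [if_pos rfl, if_pos rfl, hseen w]
        simp [pvGroup]
      · rw [if_neg hw, if_neg (fun h => hw h.symm), hseen w]
        simp [pvGroup]
    simp only [List.foldl_cons]
    rw [ih (pre ++ [(i, v)]) (by rw [hE, List.append_assoc]; rfl) _ hinv (acc ++ [_])]
    simp only [List.map_cons, List.append_assoc, List.cons_append, List.nil_append]
    congr 2

theorem pvB_eq_spec (nums : List Int) : distance_brute_force_alt nums = pvSpecList nums := by
  unfold distance_brute_force_alt pvSpecList
  rw [pvLoopB (PySem.List.enumerate nums 0)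
      (fun v => ((PySem.List.enumerate nums 0).foldl
          (fun d p => let cs := d.getD p.2 (0, 0); d.insert p.2 (cs.1 + 1, cs.2 + p.1))
          (PySem.Dict.empty : PySem.Dict Int (Int × Int))).getD v (0, 0))
      (fun v => pvTotals _ _ v |>.trans (by simp [PySem.Dict.getD_empty]))
      (PySem.List.pairwise_lt_enumerate nums 0)
      (PySem.List.enumerate nums 0) [] rfl
      (PySem.Dict.empty : PySem.Dict Int (Int × Int))
      (fun v => by simp [PySem.Dict.getD_empty, pvGroup])
      []]
  simp

-- ===== VERDICT (by name: the statement is the Claim_ definition above) =====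
theorem distance_brute_force_spec : Claim_equal_distance_brute_force := by
  intro nums _
  unfold Spec_distance_brute_force
  rw [pvA_eq_spec, pvB_eq_spec]
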